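-- pv_equiv track=rewrite | github.com/Ananya200407/Coding-challenges | series(22).py | generate_series
-- ===== SOURCE A (Python) =====
-- def generate_series(n):
--     if n <= 0:
--         return []
--
--     series = [1]
--     if n == 1:
--         return series
--
--     current_diff = 3
--
--     for i in range(1, n):
--         next_term = series[-1] + current_diff
--         series.append(next_term)
--         if i == 1:
--             increment = 0
--         else:
--             increment = 2 ** i - 2
--         current_diff += increment
--
--     return series
-- ===== SOURCE B (Python) =====
-- def generate_series(n):
--     return [2 ** (k + 1) - k * k + 2 * k - 1 for k in range(n)]
-- ===== Notes on version B (the rewrite author's own statement) =====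
-- stated objective: simpler
-- what changed: Replaced the iterative accumulator (running last term + growing difference) with a per-index closed form term(k) = 2**(k+1) - k*k + 2*k - 1 computed independently for each k.
import Mathlib
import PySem

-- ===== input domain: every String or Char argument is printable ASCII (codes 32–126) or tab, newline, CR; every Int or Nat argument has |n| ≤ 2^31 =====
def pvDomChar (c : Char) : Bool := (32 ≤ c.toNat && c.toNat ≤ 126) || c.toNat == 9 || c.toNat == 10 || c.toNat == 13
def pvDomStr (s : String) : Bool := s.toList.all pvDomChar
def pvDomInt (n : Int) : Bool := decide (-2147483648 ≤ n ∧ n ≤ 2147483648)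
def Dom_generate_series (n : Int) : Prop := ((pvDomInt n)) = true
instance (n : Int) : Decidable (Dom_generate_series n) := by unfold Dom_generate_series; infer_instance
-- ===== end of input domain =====

-- B replaces A's running-difference accumulator with an independent per-index closed form (objective: simpler).

-- ===== PORT A =====
-- loop body of A's 'for i in range(1, n)': state = (series, current_diff)
-- series[-1] is ported as pyGet? … (-1) |>.getD 0; series always contains at least [1], so pyGet? never returns none (exact)
def stepA (st : List Int × Int) (i : Int) : List Int × Int :=
  let next_term := (PySem.List.pyGet? st.1 (-1)).getD 0 + st.2
  let series := st.1 ++ [next_term]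
  let increment : Int := if i = 1 then 0 else 2 ^ i.toNat - 2
  (series, st.2 + increment)

def generate_series (n : Int) : List Int :=
  if n ≤ 0 then []
  else
    let series : List Int := [1]
    if n = 1 then series
    else ((PySem.List.pyRange 1 n 1).foldl stepA (series, 3)).1

-- ===== PORT B =====
def generate_series_alt (n : Int) : List Int :=
  (PySem.List.pyRange 0 n 1).map (fun k => 2 ^ (k + 1).toNat - k * k + 2 * k - 1)

-- ===== PRECONDITION & SPEC =====
def Spec_generate_series (n : Int) (out : List Int) : Prop := out = generate_series_alt n
instance (n : Int) (out : List Int) : Decidable (Spec_generate_series n out) := by unfold Spec_generate_series; infer_instance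

-- ===== CLAIM (what is proved, stated in full; the proofs are below) =====
def Claim_equal_generate_series : Prop := ∀ (n : Int), Dom_generate_series n → Spec_generate_series n (generate_series n)

-- ===== LEMMAS AND PROOFS =====

-- closed-form term and the running difference it induces
def fTerm (k : Nat) : Int := 2 ^ (k + 1) - (k : Int) * k + 2 * k - 1
def gDiff (k : Nat) : Int := 2 ^ (k + 1) - 2 * (k : Int) + 1

lemma fTerm_succ (k : Nat) : fTerm (k + 1) = fTerm k + gDiff k := by
  simp only [fTerm, gDiff, pow_succ]
  push_cast
  ring

lemma loop_inv (j : Nat) :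
    (PySem.List.pyRange 1 ((j : Int) + 1) 1).foldl stepA ([1], 3) =
      ((List.range (j + 1)).map fTerm, gDiff j) := by
  induction j with
  | zero => simp [PySem.List.pyRange_one_eq_nil, fTerm, gDiff]
  | succ j ih =>
    have hsplit : PySem.List.pyRange 1 ((j : Int) + 1 + 1) 1 =
        PySem.List.pyRange 1 ((j : Int) + 1) 1 ++ [(j : Int) + 1] := by
      have := PySem.List.pyRange_one_succ_right (a := 1) (b := (j : Int) + 1) (by omega)
      simpa using this
    have hcast : ((j : Int) + 1 + 1) = (((j + 1 : Nat) : Int) + 1) := by push_cast; ring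
    rw [← hcast, hsplit, List.foldl_append, ih]
    -- evaluate one step of the loop at i = j + 1
    have hlast : (PySem.List.pyGet? ((List.range (j + 1)).map fTerm) (-1)).getD 0 = fTerm j := by
      rw [List.range_succ, List.map_append]
      simp [PySem.List.pyGet?_neg_one_append_singleton]
    simp only [List.foldl_cons, List.foldl_nil, stepA, hlast, Prod.mk.injEq]
    constructor
    · rw [← fTerm_succ, List.range_succ (n := j + 1), List.map_append]
      simp
    · by_cases hj : j = 0
      · subst hj; simp [gDiff]
      · have h1 : ¬ ((j : Int) + 1 = 1) := by omega
        have h2 : ((j : Int) + 1).toNat = j + 1 := by omega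
        simp only [h1, if_false, h2, gDiff, pow_succ]
        push_cast
        ring

lemma alt_eq_map (n : Int) : generate_series_alt n = (List.range n.toNat).map fTerm := by
  unfold generate_series_alt
  rw [PySem.List.pyRange_one, List.map_map]
  simp only [sub_zero]
  refine List.map_congr_left ?_
  intro x _
  have h1 : ((0 : Int) + (x : Int) + 1).toNat = x + 1 := by omega
  simp only [Function.comp, h1, fTerm]
  ring

-- ===== VERDICT (by name: the statement is the Claim_ definition above) =====
theorem generate_series_spec : Claim_equal_generate_series := by
  intro n _
  unfold Spec_generate_series generate_series
  rw [alt_eq_map]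
  by_cases h0 : n ≤ 0
  · have : n.toNat = 0 := by omega
    simp [h0, this]
  · by_cases h1 : n = 1
    · subst h1
      norm_num [fTerm]
    · have hn : (((n - 2).toNat + 1 : Nat) : Int) + 1 = n := by omega
      have key := loop_inv ((n - 2).toNat + 1)
      rw [hn] at key
      have hnt : n.toNat = (n - 2).toNat + 1 + 1 := by omega
      simp only [h0, if_false, h1, if_false, key, hnt]
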